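-- pv_equiv track=rewrite | github.com/shaharrcohen/Algo-Graph-Project | Algo_Graph_Project.py | _is_prefix_free
-- ===== SOURCE A (Python) =====
-- from typing import Dict, List, Tuple, Set, Any
--
-- class _TrieNode:
--     __slots__ = ("children", "terminal", "sym")
--
--     def __init__(self):
--         self.children: Dict[str, "_TrieNode"] = {}
--         self.terminal: bool = False
--         self.sym: str | None = None
--
-- def _is_prefix_free(codes: Dict[str, str]) -> bool:
--     root = _TrieNode()
--     for sym, code in codes.items():
--         node = root
--         for bit in code:
--             if node.terminal:
--                 return False
--             node = node.children.setdefault(bit, _TrieNode())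
--         if node.children or node.terminal:
--             return False
--         node.terminal = True
--         node.sym = sym
--     return True
-- ===== SOURCE B (Python) =====
-- def _is_prefix_free(codes):
--     seen = []
--     for code in codes.values():
--         if any(code.startswith(prev) or prev.startswith(code) for prev in seen):
--             return False
--         seen.append(code)
--     return True
-- ===== Notes on version B (the rewrite author's own statement) =====
-- stated objective: simpler
-- what changed: Replaces the character trie with a plain one-pass scan that keeps the code values seen so far and rejects a new value as soon as it is a prefix of (or extended by) any earlier one.
import Mathlib
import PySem

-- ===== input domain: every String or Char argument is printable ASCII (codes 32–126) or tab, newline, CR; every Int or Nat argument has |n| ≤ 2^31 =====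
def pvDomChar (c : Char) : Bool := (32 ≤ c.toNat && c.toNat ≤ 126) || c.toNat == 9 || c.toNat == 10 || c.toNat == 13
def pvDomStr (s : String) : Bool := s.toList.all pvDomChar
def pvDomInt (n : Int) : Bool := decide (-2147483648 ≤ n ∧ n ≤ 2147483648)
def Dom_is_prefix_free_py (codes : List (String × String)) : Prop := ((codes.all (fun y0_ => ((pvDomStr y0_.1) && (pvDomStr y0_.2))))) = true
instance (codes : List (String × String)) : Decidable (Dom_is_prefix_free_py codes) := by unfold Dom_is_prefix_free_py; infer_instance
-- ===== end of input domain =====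

-- B replaces A's trie with a one-pass scan over the previously seen code values (simpler); return value only is compared.

-- ===== PORT A =====
-- A's _TrieNode: children dict (insertion-ordered, keyed by single chars), terminal flag.
-- The 'sym' slot is write-only in A (never read, does not affect the result) and is dropped here.
mutual
inductive PvTrie where
  | mk : Bool → PvChildren → PvTrie
deriving DecidableEq, Repr
inductive PvChildren where
  | nil : PvChildren
  | cons : Char → PvTrie → PvChildren → PvChildren
deriving DecidableEq, Repr
end

-- children[bit] lookup (first match, as in a dict with unique keys)
def pvGetChild : PvChildren → Char → Option PvTrie
  | .nil, _ => none
  | .cons b t rest, c => if b = c then some t else pvGetChild rest c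

-- children[bit] = u : overwrite in place, new keys append (dict.setdefault's write)
def pvSetChild : PvChildren → Char → PvTrie → PvChildren
  | .nil, c, u => .cons c u .nil
  | .cons b t rest, c, u => if b = c then .cons b u rest else .cons b t (pvSetChild rest c u)

-- truthiness of node.children
def pvNonEmptyC : PvChildren → Bool
  | .nil => false
  | .cons _ _ _ => true

-- the body of A's outer loop: walk 'code' from 'node', mutating the trie along the path
-- (the functional port rebuilds the path); none = A's mid-loop 'return False'.
def pvInsert : PvTrie → List Char → Option PvTrie
  | .mk term ch, [] =>
      if pvNonEmptyC ch || term then none else some (.mk true ch)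
  | .mk term ch, b :: rest =>
      if term then none
      else
        match pvInsert ((pvGetChild ch b).getD (.mk false .nil)) rest with
        | none => none
        | some sub' => some (.mk term (pvSetChild ch b sub'))

-- the outer 'for sym, code in codes.items()' loop
def pvLoopA : List (String × String) → PvTrie → Bool
  | [], _ => true
  | p :: ps, t =>
      match pvInsert t p.2.toList with
      | none => false
      | some t' => pvLoopA ps t'

def is_prefix_free_py (codes : List (String × String)) : Bool :=
  pvLoopA (PySem.Dict.ofList codes).items (.mk false .nil)

-- ===== PORT B =====
-- B keeps the list 'seen' of earlier code values; a new code clashing with any of them returns False.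
def pvLoopB : List String → List String → Bool
  | [], _ => true
  | c :: cs, seen =>
      if seen.any (fun prev => PySem.Str.startswith c prev || PySem.Str.startswith prev c) then false
      else pvLoopB cs (seen ++ [c])

def is_prefix_free_py_alt (codes : List (String × String)) : Bool :=
  pvLoopB (PySem.Dict.values (PySem.Dict.ofList codes)) []

-- ===== PRECONDITION & SPEC =====
def Spec_is_prefix_free_py (codes : List (String × String)) (out : Bool) : Prop := out = is_prefix_free_py_alt codes
instance (codes : List (String × String)) (out : Bool) : Decidable (Spec_is_prefix_free_py codes out) := by unfold Spec_is_prefix_free_py; infer_instance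

-- ===== CLAIM (what is proved, stated in full; the proofs are below) =====
def Claim_equal_is_prefix_free_py : Prop := ∀ (codes : List (String × String)), Dom_is_prefix_free_py codes → Spec_is_prefix_free_py codes (is_prefix_free_py codes)

-- ===== LEMMAS AND PROOFS =====

-- the set of code strings stored in a trie: walking s ends at a terminal node
def pvAccepts : PvTrie → List Char → Bool
  | .mk term _, [] => term
  | .mk _ ch, b :: rest =>
      match pvGetChild ch b with
      | none => false
      | some t' => pvAccepts t' rest

-- well-formedness invariant of tries A builds: every child subtree stores some string
mutual
def pvGood : PvTrie → Prop
  | .mk _ ch => pvGoodC ch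
def pvGoodC : PvChildren → Prop
  | .nil => True
  | .cons _ t rest => (∃ s, pvAccepts t s = true) ∧ pvGood t ∧ pvGoodC rest
end

def pvClash (t : PvTrie) (c : List Char) : Prop :=
  ∃ s, pvAccepts t s = true ∧ (s <+: c ∨ c <+: s)

lemma pvGetChild_setChild_self : ∀ (ch : PvChildren) (b : Char) (u : PvTrie),
    pvGetChild (pvSetChild ch b u) b = some u
  | .nil, b, u => by simp [pvSetChild, pvGetChild]
  | .cons b' t rest, b, u => by
      by_cases h : b' = b <;>
        simp [pvSetChild, pvGetChild, h, pvGetChild_setChild_self rest b u]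

lemma pvGetChild_setChild_ne : ∀ (ch : PvChildren) (b b' : Char) (u : PvTrie), b' ≠ b →
    pvGetChild (pvSetChild ch b u) b' = pvGetChild ch b'
  | .nil, b, b', u, h => by simp [pvSetChild, pvGetChild, Ne.symm h]
  | .cons b0 t rest, b, b', u, h => by
      by_cases h0 : b0 = b
      · subst h0; simp [pvSetChild, pvGetChild, Ne.symm h]
      · by_cases h1 : b0 = b'
        · subst h1; simp [pvSetChild, pvGetChild, h0]
        · simp [pvSetChild, pvGetChild, h0, h1, pvGetChild_setChild_ne rest b b' u h]

lemma pvGoodC_getChild : ∀ {ch : PvChildren} {b : Char} {t : PvTrie},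
    pvGoodC ch → pvGetChild ch b = some t →
    (∃ s, pvAccepts t s = true) ∧ pvGood t
  | .nil, b, t, hg, h => by simp [pvGetChild] at h
  | .cons b' t' rest, b, t, hg, h => by
      rw [pvGoodC] at hg
      by_cases hb : b' = b
      · simp [pvGetChild, hb] at h; subst h; exact ⟨hg.1, hg.2.1⟩
      · exact pvGoodC_getChild hg.2.2 (by simpa [pvGetChild, hb] using h)

lemma pvGoodC_setChild : ∀ {ch : PvChildren} {b : Char} {u : PvTrie},
    pvGoodC ch → (∃ s, pvAccepts u s = true) → pvGood u →
    pvGoodC (pvSetChild ch b u)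
  | .nil, b, u, hg, hu, hgu => by rw [pvSetChild, pvGoodC]; exact ⟨hu, hgu, trivial⟩
  | .cons b' t rest, b, u, hg, hu, hgu => by
      rw [pvGoodC] at hg
      by_cases hb : b' = b
      · rw [pvSetChild, if_pos hb, pvGoodC]; exact ⟨hu, hgu, hg.2.2⟩
      · rw [pvSetChild, if_neg hb, pvGoodC]; exact ⟨hg.1, hg.2.1, pvGoodC_setChild hg.2.2 hu hgu⟩

lemma pvAccepts_empty (s : List Char) : pvAccepts (.mk false .nil) s = false := by
  cases s <;> simp [pvAccepts, pvGetChild]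

lemma pvGood_empty : pvGood (.mk false .nil) := by rw [pvGood, pvGoodC]; trivial

-- A fails on 'c' exactly when the trie already stores a string in prefix relation with 'c'
lemma pvInsert_none_iff {t : PvTrie} (c : List Char) (hg : pvGood t) :
    pvInsert t c = none ↔ pvClash t c := by
  induction c generalizing t with
  | nil =>
      obtain ⟨term, ch⟩ := t
      rw [pvGood] at hg
      constructor
      · intro h
        rw [pvInsert] at h
        by_cases hne : pvNonEmptyC ch || term
        · rcases Bool.or_eq_true _ _ |>.mp hne with hne | hterm
          · cases ch with
            | nil => simp [pvNonEmptyC] at hne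
            | cons b t0 rest =>
                rw [pvGoodC] at hg
                obtain ⟨⟨s0, hs0⟩, _, _⟩ := hg
                exact ⟨b :: s0, by simp [pvAccepts, pvGetChild, hs0], Or.inr (by simp)⟩
          · exact ⟨[], by simp [pvAccepts, hterm], Or.inl List.prefix_rfl⟩
        · rw [if_neg hne] at h; exact absurd h (by simp)
      · rintro ⟨s, hacc, _⟩
        rw [pvInsert]
        cases s with
        | nil => rw [pvAccepts] at hacc; simp [hacc]
        | cons b s0 =>
            rw [pvAccepts] at hacc
            cases hget : pvGetChild ch b with
            | none => rw [hget] at hacc; simp at hacc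
            | some t0 =>
                cases ch with
                | nil => simp [pvGetChild] at hget
                | cons _ _ _ => simp [pvNonEmptyC]
  | cons b rest ih =>
      obtain ⟨term, ch⟩ := t
      rw [pvGood] at hg
      by_cases hterm : term
      · subst hterm
        constructor
        · intro _; exact ⟨[], by rw [pvAccepts], Or.inl ⟨b :: rest, rfl⟩⟩
        · intro _; rw [pvInsert]; simp
      · simp only [Bool.not_eq_true] at hterm; subst hterm
        have hstep : pvInsert (.mk false ch) (b :: rest) = none ↔
            pvInsert ((pvGetChild ch b).getD (.mk false .nil)) rest = none := by
          rw [pvInsert]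
          cases pvInsert ((pvGetChild ch b).getD (.mk false .nil)) rest <;> simp
        rw [hstep]
        cases hget : pvGetChild ch b with
        | none =>
            simp only [Option.getD_none]
            rw [ih pvGood_empty]
            constructor
            · rintro ⟨s, hacc, _⟩; rw [pvAccepts_empty] at hacc; exact absurd hacc (by simp)
            · rintro ⟨s, hacc, hpre⟩
              exfalso
              cases s with
              | nil => rw [pvAccepts] at hacc; exact absurd hacc (by simp)
              | cons b' s0 =>
                  have hb : b' = b := by
                    rcases hpre with h | h
                    · exact (List.cons_prefix_cons.mp h).1
                    · exact (List.cons_prefix_cons.mp h).1.symm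
                  subst hb
                  rw [pvAccepts, hget] at hacc; exact absurd hacc (by simp)
        | some t0 =>
            obtain ⟨_, hg0⟩ := pvGoodC_getChild hg hget
            simp only [Option.getD_some]
            rw [ih hg0]
            constructor
            · rintro ⟨s, hacc, hpre⟩
              refine ⟨b :: s, ?_, ?_⟩
              · rw [pvAccepts, hget]; exact hacc
              · rcases hpre with h | h
                · exact Or.inl (List.cons_prefix_cons.mpr ⟨rfl, h⟩)
                · exact Or.inr (List.cons_prefix_cons.mpr ⟨rfl, h⟩)
            · rintro ⟨s, hacc, hpre⟩
              cases s with
              | nil => rw [pvAccepts] at hacc; exact absurd hacc (by simp)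
              | cons b' s0 =>
                  have hb : b' = b := by
                    rcases hpre with h | h
                    · exact (List.cons_prefix_cons.mp h).1
                    · exact (List.cons_prefix_cons.mp h).1.symm
                  subst hb
                  rw [pvAccepts, hget] at hacc
                  refine ⟨s0, hacc, ?_⟩
                  rcases hpre with h | h
                  · exact Or.inl (List.cons_prefix_cons.mp h).2
                  · exact Or.inr (List.cons_prefix_cons.mp h).2

-- a successful insertion preserves the invariant and adds exactly 'c' to the stored set
lemma pvInsert_some_spec {t t' : PvTrie} (c : List Char) (hg : pvGood t)
    (h : pvInsert t c = some t') :
    pvGood t' ∧ ∀ s, pvAccepts t' s = true ↔ (pvAccepts t s = true ∨ s = c) := by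
  induction c generalizing t t' with
  | nil =>
      obtain ⟨term, ch⟩ := t
      rw [pvInsert] at h
      by_cases hne : pvNonEmptyC ch || term
      · rw [if_pos hne] at h; exact absurd h (by simp)
      · rw [if_neg hne] at h
        simp only [Option.some.injEq] at h; subst h
        have hch : ch = .nil := by
          cases ch with
          | nil => rfl
          | cons _ _ _ => simp [pvNonEmptyC] at hne
        have hterm : term = false := by
          cases term
          · rfl
          · simp at hne
        subst hch; subst hterm
        refine ⟨by rw [pvGood, pvGoodC]; trivial, fun s => ?_⟩
        cases s with
        | nil => simp [pvAccepts]
        | cons b s0 => simp [pvAccepts, pvGetChild]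
  | cons b rest ih =>
      obtain ⟨term, ch⟩ := t
      rw [pvGood] at hg
      rw [pvInsert] at h
      by_cases hterm : term
      · rw [if_pos hterm] at h; exact absurd h (by simp)
      · simp only [Bool.not_eq_true] at hterm; subst hterm
        rw [if_neg (by simp)] at h
        cases hsub : pvInsert ((pvGetChild ch b).getD (.mk false .nil)) rest with
        | none => rw [hsub] at h; exact absurd h (by simp)
        | some sub' =>
            rw [hsub] at h
            simp only [Option.some.injEq] at h; subst h
            have hgsub : pvGood ((pvGetChild ch b).getD (.mk false .nil)) := by
              cases hget : pvGetChild ch b with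
              | none => simpa using pvGood_empty
              | some t0 => simpa using (pvGoodC_getChild hg hget).2
            obtain ⟨hg', hacc'⟩ := ih hgsub hsub
            have hsub_wit : ∃ s, pvAccepts sub' s = true :=
              ⟨rest, (hacc' rest).mpr (Or.inr rfl)⟩
            refine ⟨by rw [pvGood]; exact pvGoodC_setChild hg hsub_wit hg', fun s => ?_⟩
            cases s with
            | nil => simp [pvAccepts]
            | cons b' s0 =>
                by_cases hb : b' = b
                · rw [hb]
                  rw [pvAccepts, pvAccepts, pvGetChild_setChild_self]
                  have := hacc' s0
                  cases hget : pvGetChild ch b with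
                  | none =>
                      rw [hget] at this
                      simp only [Option.getD_none, pvAccepts_empty] at this
                      simp [this]
                  | some t0 =>
                      rw [hget] at this
                      simp only [Option.getD_some] at this
                      simp [this]
                · rw [pvAccepts, pvAccepts, pvGetChild_setChild_ne ch b b' sub' hb]
                  have : ¬ (b' :: s0 = b :: rest) := by simp [hb]
                  cases pvGetChild ch b' <;> simp [this]

-- loop correspondence: trie t stores exactly the (chars of) strings in 'seen'
lemma pvLoop_eq (ps : List (String × String)) (t : PvTrie) (seen : List String)
    (hg : pvGood t)
    (hrel : ∀ s : List Char, pvAccepts t s = true ↔ ∃ p ∈ seen, p.toList = s) :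
    pvLoopA ps t = pvLoopB (ps.map Prod.snd) seen := by
  induction ps generalizing t seen with
  | nil => rfl
  | cons p ps ih =>
      have hclash : pvClash t p.2.toList ↔
          (seen.any (fun prev => PySem.Str.startswith p.2 prev || PySem.Str.startswith prev p.2)) = true := by
        rw [List.any_eq_true]
        constructor
        · rintro ⟨s, hacc, hpre⟩
          obtain ⟨q, hq, rfl⟩ := (hrel s).mp hacc
          refine ⟨q, hq, ?_⟩
          simp only [PySem.Str.startswith_eq, Bool.or_eq_true, PySem.Chars.startswith_iff]
          tauto
        · rintro ⟨q, hq, hsw⟩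
          simp only [PySem.Str.startswith_eq, Bool.or_eq_true, PySem.Chars.startswith_iff] at hsw
          exact ⟨q.toList, (hrel q.toList).mpr ⟨q, hq, rfl⟩, by tauto⟩
      rw [pvLoopA, List.map_cons, pvLoopB]
      cases hins : pvInsert t p.2.toList with
      | none =>
          rw [if_pos (hclash.mp ((pvInsert_none_iff p.2.toList hg).mp hins))]
      | some t' =>
          have hnc : ¬ pvClash t p.2.toList := by
            intro hc
            rw [(pvInsert_none_iff p.2.toList hg).mpr hc] at hins
            exact absurd hins (by simp)
          rw [if_neg (fun hb => hnc (hclash.mpr hb))]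
          obtain ⟨hg', hacc'⟩ := pvInsert_some_spec p.2.toList hg hins
          refine ih t' (seen ++ [p.2]) hg' (fun s => ?_)
          rw [hacc' s]
          constructor
          · rintro (h | rfl)
            · obtain ⟨q, hq, rfl⟩ := (hrel s).mp h
              exact ⟨q, by simp [hq], rfl⟩
            · exact ⟨p.2, by simp, rfl⟩
          · rintro ⟨q, hq, rfl⟩
            rcases List.mem_append.mp hq with h | h
            · exact Or.inl ((hrel q.toList).mpr ⟨q, h, rfl⟩)
            · simp at h; subst h; exact Or.inr rfl

-- ===== VERDICT (by name: the statement is the Claim_ definition above) =====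
theorem is_prefix_free_py_spec : Claim_equal_is_prefix_free_py := by
  intro codes _
  unfold Spec_is_prefix_free_py is_prefix_free_py is_prefix_free_py_alt
  rw [PySem.Dict.values]
  exact pvLoop_eq _ _ [] pvGood_empty
    (fun s => by rw [pvAccepts_empty]; simp)
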